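-- pv_equiv track=rewrite | github.com/raeez/chiral-bar-cobar | compute/lib/genus4_stable_graph_enumeration.py | _genus_distributions
-- ===== SOURCE A (Python) =====
-- def _genus_distributions(max_genus: int, num_v: int,
--                          upper_bound: int = None):
--     """Generate all NON-INCREASING tuples of length num_v with
--     entries in [0, upper_bound] and sum <= max_genus."""
--     if upper_bound is None:
--         upper_bound = max_genus
--     if num_v == 0:
--         if max_genus >= 0:
--             yield ()
--         return
--     if num_v == 1:
--         for g in range(min(max_genus, upper_bound), -1, -1):
--             yield (g,)
--         return
--     for g in range(min(max_genus, upper_bound), -1, -1):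
--         for rest in _genus_distributions(max_genus - g, num_v - 1, g):
--             yield (g,) + rest
-- ===== SOURCE B (Python) =====
-- def _genus_distributions(max_genus: int, num_v: int,
--                          upper_bound: int = None):
--     """Breadth-first, iterative version: grow all non-increasing prefixes
--     level by level on a work-list, then yield the last level lazily."""
--     if upper_bound is None:
--         upper_bound = max_genus
--     if num_v == 0:
--         if max_genus >= 0:
--             yield ()
--         return
--     if num_v < 0:
--         return  # no tuples of negative length
--     # each state: (prefix, remaining_sum, bound for the next entry)
--     states = [((), max_genus, upper_bound)]
--     for _ in range(num_v - 1):
--         if not states: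
--             break
--         states = [(pre + (g,), rem - g, g)
--                   for (pre, rem, bnd) in states
--                   for g in range(min(rem, bnd), -1, -1)]
--     for (pre, rem, bnd) in states:
--         for g in range(min(rem, bnd), -1, -1):
--             yield pre + (g,)
-- ===== Notes on version B (the rewrite author's own statement) =====
-- stated objective: alternative
-- what changed: Replaces A's depth-first recursive generator by an iterative breadth-first work-list: a list of (prefix, remaining_sum, bound) states is expanded level by level with one flat comprehension per level and the last level is yielded lazily; no recursion remains.
import Mathlib
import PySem

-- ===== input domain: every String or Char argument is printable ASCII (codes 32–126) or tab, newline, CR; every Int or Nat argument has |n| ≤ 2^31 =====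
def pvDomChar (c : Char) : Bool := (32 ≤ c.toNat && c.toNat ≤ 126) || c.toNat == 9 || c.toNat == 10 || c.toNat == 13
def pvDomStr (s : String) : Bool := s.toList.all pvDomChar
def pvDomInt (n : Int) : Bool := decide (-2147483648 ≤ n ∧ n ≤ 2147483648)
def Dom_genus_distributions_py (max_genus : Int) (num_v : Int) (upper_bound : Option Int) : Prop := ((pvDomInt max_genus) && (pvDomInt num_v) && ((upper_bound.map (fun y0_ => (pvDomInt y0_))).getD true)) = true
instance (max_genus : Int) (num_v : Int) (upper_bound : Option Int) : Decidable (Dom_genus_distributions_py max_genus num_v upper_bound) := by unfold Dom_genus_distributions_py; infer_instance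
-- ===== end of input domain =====

-- B replaces A's depth-first recursion by an iterative breadth-first work-list of
-- (prefix, remaining, bound) states expanded once per level; alternative decomposition, same cost.


-- ===== PORT A =====
-- recursion is on num_v carried as a Nat (Pre_ admits num_v < 0 only where A makes no recursive call)
def gdA_rec (max_genus : Int) (num_v : Nat) (upper_bound : Int) : List (List Int) :=
  match num_v with
  | 0 => if max_genus ≥ 0 then [[]] else []
  | 1 => (PySem.List.pyRange (min max_genus upper_bound) (-1) (-1)).map (fun g => [g])
  | n + 2 =>
      (PySem.List.pyRange (min max_genus upper_bound) (-1) (-1)).flatMap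
        (fun g => (gdA_rec (max_genus - g) (n + 1) g).map (fun rest => g :: rest))

def genus_distributions_py (max_genus : Int) (num_v : Int) (upper_bound : Option Int) : List (List Int) :=
  let ub := match upper_bound with | none => max_genus | some u => u
  if num_v < 0 then
    -- with num_v < 0 Python A yields nothing whenever it returns at all (its countdown range is
    -- empty); when the range is non-empty it recurses forever, which Pre_ excludes
    []
  else gdA_rec max_genus num_v.toNat ub

-- ===== PORT B =====
-- one breadth-first expansion step of the work-list of (prefix, remaining, bound) states
def gdB_step (states : List (List Int × Int × Int)) : List (List Int × Int × Int) :=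
  states.flatMap (fun s =>
    (PySem.List.pyRange (min s.2.1 s.2.2) (-1) (-1)).map
      (fun g => (s.1 ++ [g], s.2.1 - g, g)))

-- the level loop, with B's early break on an empty work-list
def gdB_loop : Nat → List (List Int × Int × Int) → List (List Int × Int × Int)
  | 0, st => st
  | k + 1, st => if st = [] then st else gdB_loop k (gdB_step st)

def genus_distributions_py_alt (max_genus : Int) (num_v : Int) (upper_bound : Option Int) : List (List Int) :=
  let ub := upper_bound.getD max_genus
  if num_v == 0 then
    (if max_genus ≥ 0 then [[]] else [])
  else if num_v < 0 then
    []
  else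
    let states := gdB_loop (num_v.toNat - 1) [(([] : List Int), max_genus, ub)]
    states.flatMap (fun s =>
      (PySem.List.pyRange (min s.2.1 s.2.2) (-1) (-1)).map (fun g => s.1 ++ [g]))

-- ===== PRECONDITION & SPEC =====
-- Pre_ excludes only the inputs where Python A never returns (unbounded recursion, a
-- RecursionError): num_v < 0 with a non-empty first countdown range.
def Pre_genus_distributions_py (max_genus : Int) (num_v : Int) (upper_bound : Option Int) : Prop :=
  0 ≤ num_v ∨ min max_genus (upper_bound.getD max_genus) < 0
instance (max_genus : Int) (num_v : Int) (upper_bound : Option Int) : Decidable (Pre_genus_distributions_py max_genus num_v upper_bound) := by unfold Pre_genus_distributions_py; infer_instance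

def pvWitness_genus_distributions_py : Int × Int × Option Int := (4, 3, none)

def Spec_genus_distributions_py (max_genus : Int) (num_v : Int) (upper_bound : Option Int) (out : List (List Int)) : Prop := out = genus_distributions_py_alt max_genus num_v upper_bound
instance (max_genus : Int) (num_v : Int) (upper_bound : Option Int) (out : List (List Int)) : Decidable (Spec_genus_distributions_py max_genus num_v upper_bound out) := by unfold Spec_genus_distributions_py; infer_instance

-- ===== CLAIM (what is proved, stated in full; the proofs are below) =====
def Claim_equal_genus_distributions_py : Prop := ∀ (max_genus : Int) (num_v : Int) (upper_bound : Option Int), Dom_genus_distributions_py max_genus num_v upper_bound → Pre_genus_distributions_py max_genus num_v upper_bound → Spec_genus_distributions_py max_genus num_v upper_bound (genus_distributions_py max_genus num_v upper_bound)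

-- ===== LEMMAS AND PROOFS =====

-- the step function acts on each state independently
theorem gdB_step_flatMap (l : List (List Int × Int × Int)) :
    gdB_step l = l.flatMap (fun s => gdB_step [s]) := by
  simp [gdB_step]

theorem gdB_iter_flatMap (k : Nat) (l : List (List Int × Int × Int)) :
    gdB_step^[k] l = l.flatMap (fun s => gdB_step^[k] [s]) := by
  induction k generalizing l with
  | zero => simp
  | succ k ih =>
      rw [Function.iterate_succ_apply, ih (gdB_step l), gdB_step_flatMap l,
        List.flatMap_assoc]
      refine List.flatMap_congr ?_
      intro s _
      rw [← ih (gdB_step [s]), ← Function.iterate_succ_apply]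

theorem gdB_step_nil : gdB_step [] = [] := by simp [gdB_step]

theorem gdB_iterate_nil (k : Nat) : gdB_step^[k] [] = [] := by
  induction k with
  | zero => rfl
  | succ k ih => rw [Function.iterate_succ_apply, gdB_step_nil, ih]

-- the early break is sound: the step function fixes the empty work-list
theorem gdB_loop_eq_iterate (k : Nat) (init : List (List Int × Int × Int)) :
    gdB_loop k init = gdB_step^[k] init := by
  induction k generalizing init with
  | zero => rfl
  | succ k ih =>
      rw [gdB_loop, Function.iterate_succ_apply]
      by_cases h : init = []
      · subst h
        rw [if_pos rfl, gdB_step_nil, gdB_iterate_nil]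
      · rw [if_neg h, ih]

-- emitting the prefixes of the next level is the prefix projection of one more step
theorem gdB_emit_eq (l : List (List Int × Int × Int)) :
    l.flatMap (fun s =>
        (PySem.List.pyRange (min s.2.1 s.2.2) (-1) (-1)).map (fun g => s.1 ++ [g]))
      = (gdB_step l).map (fun s => s.1) := by
  simp [gdB_step, List.map_flatMap, Function.comp_def]

-- core invariant: k+1 BFS steps from one state produce exactly A's recursive output,
-- each list prefixed by the state's prefix
theorem gdB_iter_eq_gdA (k : Nat) :
    ∀ (pre : List Int) (mg ub : Int),
      (gdB_step^[k + 1] [(pre, mg, ub)]).map (fun s => s.1)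
        = (gdA_rec mg (k + 1) ub).map (fun rest => pre ++ rest) := by
  induction k with
  | zero =>
      intro pre mg ub
      simp [gdB_step, gdA_rec]
  | succ k ih =>
      intro pre mg ub
      rw [Function.iterate_succ_apply, show gdB_step [(pre, mg, ub)]
          = (PySem.List.pyRange (min mg ub) (-1) (-1)).map
              (fun g => (pre ++ [g], mg - g, g)) by simp [gdB_step],
        gdB_iter_flatMap, List.flatMap_map]
      show _ = (gdA_rec mg (k + 2) ub).map _
      rw [gdA_rec, List.map_flatMap]
      simp only [List.map_flatMap]
      refine List.flatMap_congr ?_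
      intro g _
      rw [ih (pre ++ [g]) (mg - g) g]
      simp

theorem pos_int_toNat_succ (n : Int) (h0 : 0 ≤ n) (hne : ¬ n = 0) : ∃ k : Nat, n.toNat = k + 1 := by
  refine ⟨n.toNat - 1, ?_⟩
  omega

-- ===== VERDICT (by name: the statement is the Claim_ definition above) =====
theorem genus_distributions_py_spec : Claim_equal_genus_distributions_py := by
  intro mg nv ub _ hpre
  unfold Spec_genus_distributions_py genus_distributions_py genus_distributions_py_alt
  by_cases hneg : nv < 0
  · have hne : (nv == 0) = false := by simp; omega
    simp [hneg, hne]
  · have h0 : 0 ≤ nv := by omega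
    by_cases hz : nv = 0
    · subst hz
      simp [gdA_rec]
    · obtain ⟨k, hk⟩ := pos_int_toNat_succ nv h0 hz
      have hne : (nv == 0) = false := by simpa using hz
      simp only [hne, Bool.false_eq_true, if_false, if_neg hneg, hk,
        Nat.add_sub_cancel, gdB_loop_eq_iterate, gdB_emit_eq]
      rw [← Function.iterate_succ_apply' gdB_step k, gdB_iter_eq_gdA k [] mg (ub.getD mg)]
      simp [Option.getD]
      cases ub <;> simp
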